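-- pv_equiv track=rewrite | github.com/jmayclin/sl_stopwatch | punch_clock.py | getPreviousAccounts
-- ===== SOURCE A (Python) =====
-- kAccountList = 5
--
-- def getPreviousAccounts(lines):
--     # iterate backwards, getting 5 most recent accounts
--     previous = []
--     i = 1
--     while len(previous) < kAccountList and i < len(lines):
--         tokens = lines[-i].split()
--         if len(tokens) > 0 and tokens[0] == 'i' and not tokens[-1] in previous:
--             previous.append(tokens[-1])
--         i += 1
--     return previous
-- ===== SOURCE B (Python) =====
-- kAccountList = 5
--
-- def _account(line):
--     tokens = line.split()
--     if tokens and tokens[0] == 'i':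
--         return tokens[-1]
--     return None
--
-- def getPreviousAccounts(lines):
--     accounts = [a for a in map(_account, reversed(lines[1:])) if a is not None]
--     return list(dict.fromkeys(accounts))[:kAccountList]
-- ===== Notes on version B (the rewrite author's own statement) =====
-- stated objective: simpler
-- what changed: A's single interleaved while-loop with negative indexing, inline list-membership dedup and early stop is replaced by three plain passes: a filter/map over reversed(lines[1:]) extracting accounts, dict.fromkeys for order-preserving dedup, and a [:5] slice.
import Mathlib
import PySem

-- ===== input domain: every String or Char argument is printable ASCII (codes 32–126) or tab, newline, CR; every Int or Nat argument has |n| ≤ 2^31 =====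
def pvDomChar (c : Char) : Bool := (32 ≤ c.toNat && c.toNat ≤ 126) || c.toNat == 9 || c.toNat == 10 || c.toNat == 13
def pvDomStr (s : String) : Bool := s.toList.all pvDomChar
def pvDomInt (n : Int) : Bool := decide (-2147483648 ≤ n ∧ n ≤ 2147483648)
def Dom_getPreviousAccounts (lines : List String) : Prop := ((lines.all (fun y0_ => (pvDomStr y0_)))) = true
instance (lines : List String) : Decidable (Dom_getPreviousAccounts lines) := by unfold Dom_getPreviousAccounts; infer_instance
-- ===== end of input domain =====

-- B replaces A's interleaved scan/membership/early-stop while-loop by three plain passes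
-- (filter over reversed(lines[1:]), dict.fromkeys dedup, [:5] slice) — objective: simpler.


-- ===== PORT A =====
-- the while-loop of A: state (previous, i), guard len(previous) < 5 and i < len(lines)
def pvALoop (lines : List String) (previous : List String) (i : Nat) : List String :=
  if h : previous.length < 5 ∧ i < lines.length then
    match PySem.List.pyGet? lines (-(i : Int)) with
    | none => previous   -- unreachable: the guard keeps -i in range
    | some line =>
      let tokens := PySem.Str.split₀ line
      if tokens.length > 0 ∧ PySem.List.pyGet? tokens 0 = some "i"
          ∧ ((PySem.List.pyGet? tokens (-1)).getD "") ∉ previous then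
        pvALoop lines (previous ++ [(PySem.List.pyGet? tokens (-1)).getD ""]) (i + 1)
      else
        pvALoop lines previous (i + 1)
  else previous
termination_by lines.length - i
decreasing_by all_goals omega

def getPreviousAccounts (lines : List String) : List String :=
  pvALoop lines [] 1

-- ===== PORT B =====
-- _account(line): the account named on an 'i' line, else None
def pvAccount? (line : String) : Option String :=
  match PySem.Str.split₀ line with
  | [] => none
  | t :: ts => if t = "i" then some ((t :: ts).getLast (by simp)) else none

def getPreviousAccounts_alt (lines : List String) : List String :=
  let accounts := ((PySem.List.slice lines (some 1) none).reverse).filterMap pvAccount?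
  (PySem.List.dedup accounts).take 5

-- ===== PRECONDITION & SPEC =====
def Spec_getPreviousAccounts (lines : List String) (out : List String) : Prop := out = getPreviousAccounts_alt lines
instance (lines : List String) (out : List String) : Decidable (Spec_getPreviousAccounts lines out) := by unfold Spec_getPreviousAccounts; infer_instance

-- ===== CLAIM (what is proved, stated in full; the proofs are below) =====
def Claim_equal_getPreviousAccounts : Prop := ∀ (lines : List String), Dom_getPreviousAccounts lines → Spec_getPreviousAccounts lines (getPreviousAccounts lines)

-- ===== LEMMAS AND PROOFS =====

-- A's loop, re-expressed as structural recursion over the list of lines it scans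
def pvScan (prev : List String) : List String → List String
  | [] => prev
  | l :: ls =>
    if prev.length < 5 then
      match pvAccount? l with
      | some a => if a ∉ prev then pvScan (prev ++ [a]) ls else pvScan prev ls
      | none => pvScan prev ls
    else prev

theorem pvScan_of_full (prev : List String) (xs : List String) (h : ¬ prev.length < 5) :
    pvScan prev xs = prev := by
  cases xs with
  | nil => rfl
  | cons l ls => simp [pvScan, h]

-- pvAccount? in terms of A's primitives
theorem pvAccount?_eq (line : String) :
    pvAccount? line =
      (if (PySem.Str.split₀ line).length > 0 ∧ PySem.List.pyGet? (PySem.Str.split₀ line) 0 = some "i" then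
        some ((PySem.List.pyGet? (PySem.Str.split₀ line) (-1)).getD "")
      else none) := by
  unfold pvAccount?
  cases hs : PySem.Str.split₀ line with
  | nil => simp
  | cons t ts =>
    by_cases ht : t = "i"
    · subst ht
      rw [if_pos ⟨by simp, by rw [PySem.List.pyGet?_zero_cons]⟩]
      rw [PySem.List.pyGet?_neg_one, List.getLast?_eq_some_getLast (by simp)]
      simp
    · rw [if_neg]
      · simp [ht]
      · rw [PySem.List.pyGet?_zero_cons]
        rintro ⟨-, h⟩
        exact ht (by injection h)

-- reindexing: pvALoop starting at index j+1 scans exactly (lines.reverse.take (len-1)).drop j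
theorem pvALoop_eq_scan (lines : List String) :
    ∀ k j prev, lines.length - j ≤ k →
      pvALoop lines prev (j + 1) = pvScan prev ((lines.reverse.take (lines.length - 1)).drop j) := by
  intro k
  induction k with
  | zero =>
    intro j prev hk
    rw [pvALoop]
    have hR : (lines.reverse.take (lines.length - 1)).drop j = [] := by
      apply List.drop_eq_nil_of_le
      simp; omega
    rw [hR]
    have : ¬ (prev.length < 5 ∧ j + 1 < lines.length) := by omega
    simp [this, pvScan]
  | succ k ih =>
    intro j prev hk
    rw [pvALoop]
    by_cases h5 : prev.length < 5
    · by_cases hj : j + 1 < lines.length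
      · have hjr : j < lines.reverse.length := by simp; omega
        have hne : j < (lines.reverse.take (lines.length - 1)).length := by simp; omega
        have hdrop : (lines.reverse.take (lines.length - 1)).drop j =
            (lines.reverse[j]'hjr) :: ((lines.reverse.take (lines.length - 1)).drop (j + 1)) := by
          rw [List.drop_eq_getElem_cons hne]
          congr 1
          simp
        have hget : PySem.List.pyGet? lines (-((j + 1 : Nat) : Int)) = some (lines.reverse[j]'hjr) := by
          have h1 : PySem.List.pyGet? lines (-((j + 1 : Nat) : Int)) = lines[lines.length - (j + 1)]? :=
            PySem.List.pyGet?_neg_natCast lines (j + 1) (by omega) (by omega)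
          have h2 : lines.length - (j + 1) = lines.length - 1 - j := by omega
          rw [h1, List.getElem?_eq_getElem (by omega)]
          simp [List.getElem_reverse, h2]
        rw [dif_pos ⟨h5, hj⟩, hget, hdrop]
        simp only [pvScan, if_pos h5, pvAccount?_eq]
        by_cases hc : (PySem.Str.split₀ (lines.reverse[j]'hjr)).length > 0 ∧
            PySem.List.pyGet? (PySem.Str.split₀ (lines.reverse[j]'hjr)) 0 = some "i"
        · by_cases hmem : ((PySem.List.pyGet? (PySem.Str.split₀ (lines.reverse[j]'hjr)) (-1)).getD "") ∉ prev
          · rw [if_pos ⟨hc.1, hc.2, hmem⟩, if_pos hc]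
            simp only [if_pos hmem]
            exact ih (j + 1) _ (by omega)
          · rw [if_neg (by tauto), if_pos hc]
            simp only [if_neg hmem]
            exact ih (j + 1) _ (by omega)
        · rw [if_neg (by tauto), if_neg hc]
          exact ih (j + 1) _ (by omega)
      · have hR : (lines.reverse.take (lines.length - 1)).drop j = [] := by
          apply List.drop_eq_nil_of_le
          simp; omega
        have : ¬ (prev.length < 5 ∧ j + 1 < lines.length) := by omega
        rw [hR]
        simp [this, pvScan]
    · have : ¬ (prev.length < 5 ∧ j + 1 < lines.length) := by omega
      simp only [dif_neg this]
      exact (pvScan_of_full prev _ h5).symm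

-- Set.update always extends its first argument on the right
theorem pvUpdate_prefix (ys : List String) : ∀ s : List String, ∃ t, PySem.Set.update s ys = s ++ t := by
  induction ys with
  | nil => intro s; exact ⟨[], by simp [PySem.Set.update]⟩
  | cons y ys ih =>
    intro s
    have hstep : PySem.Set.update s (y :: ys) = PySem.Set.update (PySem.Set.add s y) ys := rfl
    obtain ⟨t, ht⟩ := ih (PySem.Set.add s y)
    by_cases hy : PySem.Set.contains s y
    · exact ⟨t, by rw [hstep, ht, PySem.Set.add, if_pos hy]⟩
    · exact ⟨y :: t, by rw [hstep, ht, PySem.Set.add, if_neg hy]; simp⟩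

-- main invariant: A's scan = the not-yet-seen part of the dedup, capped at 5 - |prev|
theorem pvScan_spec (xs : List String) : ∀ prev : List String,
    pvScan prev xs =
      prev ++ ((PySem.Set.update prev (xs.filterMap pvAccount?)).drop prev.length).take (5 - prev.length) := by
  induction xs with
  | nil => intro prev; simp [pvScan, PySem.Set.update]
  | cons l ls ih =>
    intro prev
    by_cases h5 : prev.length < 5
    · cases ha : pvAccount? l with
      | none =>
        simp only [pvScan, if_pos h5, ha, List.filterMap_cons_none ha]
        exact ih prev
      | some a =>
        have hfm : (l :: ls).filterMap pvAccount? = a :: ls.filterMap pvAccount? :=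
          List.filterMap_cons_some ha
        by_cases hmem : a ∉ prev
        · have hcont : PySem.Set.contains prev a = false := by
            simp [PySem.Set.contains]
            simpa using hmem
          have hupd : PySem.Set.update prev ((l :: ls).filterMap pvAccount?) =
              PySem.Set.update (prev ++ [a]) (ls.filterMap pvAccount?) := by
            rw [hfm]
            show PySem.Set.update (PySem.Set.add prev a) _ = _
            rw [PySem.Set.add, hcont]
            simp
          simp only [pvScan, if_pos h5, ha, if_pos hmem, hupd]
          rw [ih (prev ++ [a])]
          obtain ⟨t, ht⟩ := pvUpdate_prefix (ls.filterMap pvAccount?) (prev ++ [a])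
          rw [ht]
          have e1 : (prev ++ [a] ++ t).drop prev.length = a :: t := by
            rw [List.append_assoc]
            simp
          have e2 : (prev ++ [a] ++ t).drop ((prev ++ [a]).length) = t := by
            simp
          rw [e1, e2]
          have h51 : 5 - prev.length = (5 - (prev ++ [a]).length) + 1 := by
            simp; omega
          rw [h51, List.take_succ_cons]
          simp
        · push_neg at hmem
          have hcont : PySem.Set.contains prev a = true := by
            simp [PySem.Set.contains]
            simpa using hmem
          have hupd : PySem.Set.update prev ((l :: ls).filterMap pvAccount?) =
              PySem.Set.update prev (ls.filterMap pvAccount?) := by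
            rw [hfm]
            show PySem.Set.update (PySem.Set.add prev a) _ = _
            rw [PySem.Set.add, hcont]
            simp
          simp only [pvScan, if_pos h5, ha]
          rw [if_neg (show ¬ a ∉ prev by simpa using hmem), hupd]
          exact ih prev
    · rw [pvScan_of_full _ _ h5]
      have h50 : 5 - prev.length = 0 := by omega
      simp [h50]

-- ===== VERDICT (by name: the statement is the Claim_ definition above) =====
theorem getPreviousAccounts_spec : Claim_equal_getPreviousAccounts := by
  intro lines _
  unfold Spec_getPreviousAccounts getPreviousAccounts getPreviousAccounts_alt
  have h1 : pvALoop lines [] 1 = pvScan [] (lines.reverse.take (lines.length - 1)) := by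
    have := pvALoop_eq_scan lines lines.length 0 [] (by omega)
    simpa using this
  have hR : lines.reverse.take (lines.length - 1) = (PySem.List.slice lines (some 1) none).reverse := by
    rw [PySem.List.slice_from_one]
    cases lines with
    | nil => simp
    | cons x xs => simp [List.take_reverse]
  rw [h1, hR, pvScan_spec]
  simp only [List.length_nil, List.drop_zero, List.nil_append, Nat.sub_zero]
  have hded : PySem.List.dedup (((PySem.List.slice lines (some 1) none).reverse).filterMap pvAccount?) =
      PySem.Set.update [] (((PySem.List.slice lines (some 1) none).reverse).filterMap pvAccount?) := by
    rw [PySem.List.dedup_eq_ofList, PySem.Set.ofList_eq_foldl]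
    rfl
  rw [hded]
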